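-- pv_equiv track=rewrite | github.com/porteomar/Data-science | multi_word_search.py | multi_word_search
-- ===== SOURCE A (Python) =====
-- def multi_word_search(doc_list, keywords):
--     """
--     Takes list of documents (each document is a string) and a list of keywords.
--     Returns a dictionary where each key is a keyword, and the value is a list of indices
--     (from doc_list) of the documents containing that keyword
--
--     >>> doc_list = ["The Learn Python Challenge Casino.", "They bought a car and a casino", "Casinoville"]
--     >>> keywords = ['casino', 'they']
--     >>> multi_word_search(doc_list, keywords)
--     {'casino': [0, 1], 'they': [1]}
--     """
--     index_dict = {}
--
--     if keywords == []:
--         return index_dict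
--     else:
--         for keyword in keywords:
--             index_dict.update({keyword:[]})
--
--     for i, doc in enumerate(doc_list):
--         tokens = doc.split()
--         cleaned = [token.rstrip('.,?!').lower() for token in tokens]
--
--         for keyword in keywords:
--             if keyword.lower() in cleaned:
--                 index_dict[keyword].append(i)
--
--     return index_dict
-- ===== SOURCE B (Python) =====
-- def multi_word_search(doc_list, keywords):
--     result = {k: [] for k in keywords}
--     # query index: lowercase form -> the keyword occurrences that have it
--     by_token = {}
--     for k in keywords:
--         by_token.setdefault(k.lower(), []).append(k)
--     # stream the documents once; each distinct cleaned token triggers its keywords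
--     for i, doc in enumerate(doc_list):
--         seen = set()
--         for token in doc.split():
--             t = token.rstrip('.,?!').lower()
--             if t not in seen:
--                 seen.add(t)
--                 for k in by_token.get(t, []):
--                     result[k].append(i)
--     return result
-- ===== Notes on version B (the rewrite author's own statement) =====
-- stated objective: faster
-- what changed: B indexes the keywords once by their lowercase form (a multimap of keyword occurrences) and then streams each document's distinct cleaned tokens a single time, appending the document index for every keyword occurrence in the matching bucket, instead of A's rescan of the whole keyword list (with a linear membership test in the cleaned token list) for every document.
import Mathlib
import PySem

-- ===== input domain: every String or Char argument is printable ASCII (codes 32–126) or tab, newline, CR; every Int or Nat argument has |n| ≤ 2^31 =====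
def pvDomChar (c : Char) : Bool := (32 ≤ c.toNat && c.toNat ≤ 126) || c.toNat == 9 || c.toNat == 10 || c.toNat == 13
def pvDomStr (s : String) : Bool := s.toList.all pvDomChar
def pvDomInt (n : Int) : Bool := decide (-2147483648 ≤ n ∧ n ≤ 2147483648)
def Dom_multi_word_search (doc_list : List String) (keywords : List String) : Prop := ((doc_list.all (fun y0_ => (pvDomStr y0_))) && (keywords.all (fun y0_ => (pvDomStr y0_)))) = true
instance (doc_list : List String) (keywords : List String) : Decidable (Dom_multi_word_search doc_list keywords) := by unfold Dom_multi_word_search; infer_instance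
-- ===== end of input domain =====

-- B indexes the keywords once by lowercase form and streams each document's distinct cleaned tokens
-- a single time, instead of A's rescan of the whole keyword list per document (objective: faster).
-- Same return value as A everywhere.

-- ===== PORT A =====
-- shared helper: exact port of token.rstrip('.,?!') — drops trailing '.' ',' '?' '!' characters
def pvRstripPunct (s : String) : String :=
  String.mk ((s.toList.reverse.dropWhile (fun c => c == '.' || c == ',' || c == '?' || c == '!')).reverse)

-- shared helper: the cleaned token list of a document ([token.rstrip('.,?!').lower() for token in doc.split()])
def pvCleanedOf (doc : String) : List String :=
  (PySem.Str.split₀ doc).map (fun token => PySem.Str.lower (pvRstripPunct token))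

-- A's per-document step: for keyword in keywords: if keyword.lower() in cleaned: index_dict[keyword].append(i)
def pvDocA (keywords : List String) (d : PySem.Dict String (List Int)) (p : Int × String) :
    PySem.Dict String (List Int) :=
  let cleaned := pvCleanedOf p.2
  keywords.foldl
    (fun d keyword =>
      if PySem.Str.lower keyword ∈ cleaned then d.modify keyword [] (fun v => v ++ [p.1]) else d) d

def multi_word_search (doc_list : List String) (keywords : List String) : List (String × List Int) :=
  let index_dict : PySem.Dict String (List Int) := PySem.Dict.empty
  if keywords = [] then index_dict.items
  else
    let d1 := keywords.foldl (fun d keyword => d.insert keyword ([] : List Int)) index_dict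
    let d2 := (PySem.List.enumerate doc_list).foldl (pvDocA keywords) d1
    d2.items

-- ===== PORT B =====
-- by_token.setdefault(k.lower(), []).append(k) over the keywords
def pvByToken (keywords : List String) : PySem.Dict String (List String) :=
  keywords.foldl (fun d k => d.modify (PySem.Str.lower k) [] (fun v => v ++ [k])) PySem.Dict.empty

-- for k in by_token.get(t, []): result[k].append(i)
def pvTrigger (bt : PySem.Dict String (List String)) (i : Int)
    (r : PySem.Dict String (List Int)) (t : String) : PySem.Dict String (List Int) :=
  (bt.getD t []).foldl (fun r k => r.modify k [] (fun v => v ++ [i])) r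

-- B's per-token step: t = token.rstrip('.,?!').lower(); if t not in seen: seen.add(t); trigger t's bucket
def pvTokStepB (bt : PySem.Dict String (List String)) (i : Int)
    (st : PySem.Set String × PySem.Dict String (List Int)) (token : String) :
    PySem.Set String × PySem.Dict String (List Int) :=
  let t := PySem.Str.lower (pvRstripPunct token)
  if st.1.contains t then st
  else (PySem.Set.add st.1 t, pvTrigger bt i st.2 t)

-- B's per-document step: fresh seen = set(), then the token loop
def pvDocB (bt : PySem.Dict String (List String)) (r : PySem.Dict String (List Int))
    (p : Int × String) : PySem.Dict String (List Int) :=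
  ((PySem.Str.split₀ p.2).foldl (pvTokStepB bt p.1) (PySem.Set.empty, r)).2

def multi_word_search_alt (doc_list : List String) (keywords : List String) : List (String × List Int) :=
  let result0 := keywords.foldl (fun r k => r.insert k ([] : List Int))
    (PySem.Dict.empty : PySem.Dict String (List Int))
  let bt := pvByToken keywords
  ((PySem.List.enumerate doc_list).foldl (pvDocB bt) result0).items

-- ===== PRECONDITION & SPEC =====
def Spec_multi_word_search (doc_list : List String) (keywords : List String) (out : List (String × List Int)) : Prop :=
  out = multi_word_search_alt doc_list keywords
instance (doc_list : List String) (keywords : List String) (out : List (String × List Int)) : Decidable (Spec_multi_word_search doc_list keywords out) := by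
  unfold Spec_multi_word_search; infer_instance

-- ===== CLAIM (what is proved, stated in full; the proofs are below) =====
def Claim_equal_multi_word_search : Prop := ∀ (doc_list : List String) (keywords : List String), Dom_multi_word_search doc_list keywords → Spec_multi_word_search doc_list keywords (multi_word_search doc_list keywords)

-- ===== LEMMAS AND PROOFS =====

-- the matching indices of docs (starting at index i), each repeated c times
-- (c = keywords.count k for both programs)
def pvMatchRep (c : Nat) (t : String) (i : Int) (docs : List String) : List Int :=
  match docs with
  | [] => []
  | d :: ds => (if t ∈ pvCleanedOf d then List.replicate c i else []) ++ pvMatchRep c t (i + 1) ds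

-- A's inner keyword loop: the value at x grows by count x copies of i when lower x matches
theorem pvInnerA_getD (kws : List String) (cleaned : List String) (i : Int)
    (d : PySem.Dict String (List Int)) (x : String) :
    ((kws.foldl (fun d keyword =>
        if PySem.Str.lower keyword ∈ cleaned then d.modify keyword [] (fun v => v ++ [i]) else d) d).getD x [])
      = d.getD x [] ++ (if PySem.Str.lower x ∈ cleaned then List.replicate (kws.count x) i else []) := by
  induction kws generalizing d with
  | nil => simp
  | cons k rest ih =>
    simp only [List.foldl_cons]
    by_cases hk : k = x
    · subst hk
      by_cases hc : PySem.Str.lower k ∈ cleaned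
      · rw [ih]
        simp [PySem.Dict.modify, hc, List.replicate_succ]
      · rw [ih]; simp [hc]
    · rw [ih]
      by_cases hc : PySem.Str.lower k ∈ cleaned
      · rw [if_pos hc]
        simp [PySem.Dict.modify, PySem.Dict.getD_insert, hk]
        intro h; exact absurd h.symm hk
      · rw [if_neg hc]
        simp [hk]

-- A's inner keyword loop preserves keys when every keyword is already a key
theorem pvInnerA_keys (kws : List String) (cleaned : List String) (i : Int)
    (d : PySem.Dict String (List Int)) (h : ∀ k ∈ kws, k ∈ d.keys) :
    ((kws.foldl (fun d keyword =>
        if PySem.Str.lower keyword ∈ cleaned then d.modify keyword [] (fun v => v ++ [i]) else d) d).keys)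
      = d.keys := by
  induction kws generalizing d with
  | nil => rfl
  | cons k rest ih =>
    simp only [List.foldl_cons]
    by_cases hc : PySem.Str.lower k ∈ cleaned
    · rw [if_pos hc]
      have hcont : d.contains k = true := (PySem.Dict.contains_iff_mem_keys d k).2 (h k (by simp))
      have hkeys : (d.modify k [] (fun v => v ++ [i])).keys = d.keys := by
        rw [PySem.Dict.keys_modify, PySem.Dict.keys_insert_of_contains _ _ hcont]
      rw [ih _ (fun k' hk' => hkeys ▸ h k' (by simp [hk'])), hkeys]
    · rw [if_neg hc]
      exact ih _ (fun k' hk' => h k' (by simp [hk']))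

-- A's doc loop: the value at x
theorem pvDocA_getD (keywords docs : List String) (i : Int)
    (d : PySem.Dict String (List Int)) (x : String) :
    (((PySem.List.enumerate docs i).foldl (pvDocA keywords) d).getD x [])
      = d.getD x [] ++ pvMatchRep (keywords.count x) (PySem.Str.lower x) i docs := by
  induction docs generalizing i d with
  | nil => simp [PySem.List.enumerate, pvMatchRep]
  | cons doc ds ih =>
    have he : PySem.List.enumerate (doc :: ds) i = (i, doc) :: PySem.List.enumerate ds (i + 1) := rfl
    rw [he, List.foldl_cons, ih]
    show (pvDocA keywords d (i, doc)).getD x [] ++ _ = _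
    unfold pvDocA
    rw [pvInnerA_getD]
    simp [pvMatchRep, List.append_assoc]

-- A's doc loop preserves keys when every keyword is a key
theorem pvDocA_keys (keywords docs : List String) (i : Int)
    (d : PySem.Dict String (List Int)) (h : ∀ k ∈ keywords, k ∈ d.keys) :
    ((PySem.List.enumerate docs i).foldl (pvDocA keywords) d).keys = d.keys := by
  induction docs generalizing i d with
  | nil => rfl
  | cons doc ds ih =>
    have he : PySem.List.enumerate (doc :: ds) i = (i, doc) :: PySem.List.enumerate ds (i + 1) := rfl
    rw [he, List.foldl_cons]
    have hk : (pvDocA keywords d (i, doc)).keys = d.keys := pvInnerA_keys _ _ _ _ h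
    rw [ih _ _ (fun k hk' => hk ▸ h k hk'), hk]

-- the insert-[] initialisation loop leaves every value []
theorem pvInitA_getD (kws : List String) (d : PySem.Dict String (List Int)) (x : String)
    (h : d.getD x [] = []) :
    (kws.foldl (fun d keyword => d.insert keyword ([] : List Int)) d).getD x [] = [] := by
  induction kws generalizing d with
  | nil => exact h
  | cons k rest ih =>
    rw [List.foldl_cons]
    exact ih _ (by rw [PySem.Dict.getD_insert]; split <;> simp [h])

-- B's query index: the bucket of t is the keyword occurrences whose lowercase form is t, in order
theorem pvByToken_getD (kws : List String) (d : PySem.Dict String (List String)) (t : String) :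
    ((kws.foldl (fun d k => d.modify (PySem.Str.lower k) [] (fun v => v ++ [k])) d).getD t [])
      = d.getD t [] ++ kws.filter (fun k => PySem.Str.lower k == t) := by
  induction kws generalizing d with
  | nil => simp
  | cons k rest ih =>
    rw [List.foldl_cons, ih]
    by_cases h : PySem.Str.lower k = t
    · subst h
      simp [PySem.Dict.modify]
    · have hne : (d.modify (PySem.Str.lower k) [] (fun v => v ++ [k])).getD t [] = d.getD t [] := by
        simp [PySem.Dict.modify, PySem.Dict.getD_insert]
        intro hh; exact absurd hh.symm h
      simp [h, hne]

-- the multiplicity of x in the bucket of t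
theorem pvBucket_count (kws : List String) (t x : String) :
    ((kws.filter (fun k => PySem.Str.lower k == t)).count x)
      = if PySem.Str.lower x = t then kws.count x else 0 := by
  induction kws with
  | nil => simp
  | cons k rest ih =>
    rw [List.filter_cons]
    by_cases hk : PySem.Str.lower k = t
    · rw [if_pos (by simp [hk])]
      by_cases hx : k = x
      · subst hx
        simp [List.count_cons, ih, hk]
      · simp [List.count_cons, ih, hx]
    · rw [if_neg (by simp [hk])]
      by_cases hx : k = x
      · subst hx
        simp [List.count_cons, ih, hk]
      · simp [List.count_cons, ih, hx]

-- the bucket fold: the value at x grows by one copy of i per occurrence of x in the bucket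
theorem pvBucketFold_getD (bucket : List String) (i : Int)
    (r : PySem.Dict String (List Int)) (x : String) :
    ((bucket.foldl (fun r k => r.modify k [] (fun v => v ++ [i])) r).getD x [])
      = r.getD x [] ++ List.replicate (bucket.count x) i := by
  induction bucket generalizing r with
  | nil => simp
  | cons k rest ih =>
    rw [List.foldl_cons, ih]
    by_cases hk : k = x
    · subst hk
      simp [PySem.Dict.modify, List.replicate_succ]
    · have hne : (r.modify k [] (fun v => v ++ [i])).getD x [] = r.getD x [] := by
        simp [PySem.Dict.modify, PySem.Dict.getD_insert]
        intro hh; exact absurd hh.symm hk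
      simp [hk, hne]

-- the bucket fold preserves keys when every bucket element is already a key
theorem pvBucketFold_keys (bucket : List String) (i : Int)
    (r : PySem.Dict String (List Int)) (h : ∀ k ∈ bucket, k ∈ r.keys) :
    ((bucket.foldl (fun r k => r.modify k [] (fun v => v ++ [i])) r).keys) = r.keys := by
  induction bucket generalizing r with
  | nil => rfl
  | cons k rest ih =>
    rw [List.foldl_cons]
    have hcont : r.contains k = true := (PySem.Dict.contains_iff_mem_keys r k).2 (h k (by simp))
    have hkeys : (r.modify k [] (fun v => v ++ [i])).keys = r.keys := by
      rw [PySem.Dict.keys_modify, PySem.Dict.keys_insert_of_contains _ _ hcont]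
    rw [ih _ (fun k' hk' => hkeys ▸ h k' (by simp [hk'])), hkeys]

-- triggering t's bucket: the value at x grows by count x copies of i exactly when t = lower x
theorem pvTrigger_getD (keywords : List String) (i : Int)
    (r : PySem.Dict String (List Int)) (t x : String) :
    ((pvTrigger (pvByToken keywords) i r t).getD x [])
      = r.getD x [] ++ (if PySem.Str.lower x = t then List.replicate (keywords.count x) i else []) := by
  unfold pvTrigger pvByToken
  rw [pvByToken_getD, PySem.Dict.getD_empty, List.nil_append, pvBucketFold_getD, pvBucket_count]
  by_cases h : PySem.Str.lower x = t <;> simp [h]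

-- triggering a bucket preserves keys when every keyword is a key
theorem pvTrigger_keys (keywords : List String) (i : Int)
    (r : PySem.Dict String (List Int)) (t : String) (h : ∀ k ∈ keywords, k ∈ r.keys) :
    (pvTrigger (pvByToken keywords) i r t).keys = r.keys := by
  unfold pvTrigger pvByToken
  rw [pvByToken_getD, PySem.Dict.getD_empty, List.nil_append]
  exact pvBucketFold_keys _ _ _ (fun k hk => h k (List.mem_of_mem_filter hk))

-- B's token loop: the value at x
set_option maxHeartbeats 1000000 in
theorem pvTokB_getD (keywords tokens : List String) (i : Int) (seen : PySem.Set String)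
    (r : PySem.Dict String (List Int)) (x : String) :
    (((tokens.foldl (pvTokStepB (pvByToken keywords) i) (seen, r)).2).getD x [])
      = r.getD x [] ++
        (if PySem.Str.lower x ∈ tokens.map (fun token => PySem.Str.lower (pvRstripPunct token))
            ∧ PySem.Str.lower x ∉ seen
         then List.replicate (keywords.count x) i else []) := by
  induction tokens generalizing seen r with
  | nil => simp
  | cons token rest ih =>
    simp only [List.foldl_cons, List.map_cons]
    by_cases hs : PySem.Str.lower (pvRstripPunct token) ∈ seen
    · have hstep : pvTokStepB (pvByToken keywords) i (seen, r) token = (seen, r) := by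
        simp only [pvTokStepB]
        rw [if_pos ((PySem.Set.contains_iff _ _).2 hs)]
      rw [hstep, ih]
      congr 1
      by_cases hx : PySem.Str.lower x = PySem.Str.lower (pvRstripPunct token)
      · have hxs : PySem.Str.lower x ∈ seen := by rw [hx]; exact hs
        simp [hxs]
      · simp [hx]
    · have hstep : pvTokStepB (pvByToken keywords) i (seen, r) token
          = (PySem.Set.add seen (PySem.Str.lower (pvRstripPunct token)),
             pvTrigger (pvByToken keywords) i r (PySem.Str.lower (pvRstripPunct token))) := by
        simp only [pvTokStepB]
        rw [if_neg (fun hc => hs ((PySem.Set.contains_iff _ _).1 hc))]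
      rw [hstep, ih, pvTrigger_getD]
      by_cases hx : PySem.Str.lower x = PySem.Str.lower (pvRstripPunct token)
      · have hmm : PySem.Str.lower x ∈ PySem.Set.add seen (PySem.Str.lower (pvRstripPunct token)) := by
          rw [hx]; exact (PySem.Set.mem_add _ _ _).2 (Or.inr rfl)
        simp [hx, hs, hmm]
      · have hmm : PySem.Str.lower x ∈ PySem.Set.add seen (PySem.Str.lower (pvRstripPunct token))
            ↔ PySem.Str.lower x ∈ seen := by
          simp [PySem.Set.mem_add, hx]
        simp [hx, hmm]

-- B's token loop preserves keys when every keyword is a key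
theorem pvTokB_keys (keywords tokens : List String) (i : Int) (seen : PySem.Set String)
    (r : PySem.Dict String (List Int)) (h : ∀ k ∈ keywords, k ∈ r.keys) :
    ((tokens.foldl (pvTokStepB (pvByToken keywords) i) (seen, r)).2).keys = r.keys := by
  induction tokens generalizing seen r with
  | nil => rfl
  | cons token rest ih =>
    simp only [List.foldl_cons]
    by_cases hs : PySem.Str.lower (pvRstripPunct token) ∈ seen
    · have hstep : pvTokStepB (pvByToken keywords) i (seen, r) token = (seen, r) := by
        simp only [pvTokStepB]
        rw [if_pos ((PySem.Set.contains_iff _ _).2 hs)]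
      rw [hstep]
      exact ih _ _ h
    · have hstep : pvTokStepB (pvByToken keywords) i (seen, r) token
          = (PySem.Set.add seen (PySem.Str.lower (pvRstripPunct token)),
             pvTrigger (pvByToken keywords) i r (PySem.Str.lower (pvRstripPunct token))) := by
        simp only [pvTokStepB]
        rw [if_neg (fun hc => hs ((PySem.Set.contains_iff _ _).1 hc))]
      rw [hstep]
      have hkeys := pvTrigger_keys keywords i r (PySem.Str.lower (pvRstripPunct token)) h
      rw [ih _ _ (fun k hk => hkeys ▸ h k hk), hkeys]

-- B's doc loop: the value at x
theorem pvDocB_getD (keywords docs : List String) (i : Int)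
    (r : PySem.Dict String (List Int)) (x : String) :
    (((PySem.List.enumerate docs i).foldl (pvDocB (pvByToken keywords)) r).getD x [])
      = r.getD x [] ++ pvMatchRep (keywords.count x) (PySem.Str.lower x) i docs := by
  induction docs generalizing i r with
  | nil => simp [PySem.List.enumerate, pvMatchRep]
  | cons doc ds ih =>
    have he : PySem.List.enumerate (doc :: ds) i = (i, doc) :: PySem.List.enumerate ds (i + 1) := rfl
    rw [he, List.foldl_cons, ih]
    show (pvDocB (pvByToken keywords) r (i, doc)).getD x [] ++ _ = _
    unfold pvDocB
    rw [pvTokB_getD]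
    simp only [PySem.Set.empty]
    simp [pvMatchRep, pvCleanedOf, List.append_assoc]

-- B's doc loop preserves keys when every keyword is a key
theorem pvDocB_keys (keywords docs : List String) (i : Int)
    (r : PySem.Dict String (List Int)) (h : ∀ k ∈ keywords, k ∈ r.keys) :
    ((PySem.List.enumerate docs i).foldl (pvDocB (pvByToken keywords)) r).keys = r.keys := by
  induction docs generalizing i r with
  | nil => rfl
  | cons doc ds ih =>
    have he : PySem.List.enumerate (doc :: ds) i = (i, doc) :: PySem.List.enumerate ds (i + 1) := rfl
    rw [he, List.foldl_cons]
    have hk : (pvDocB (pvByToken keywords) r (i, doc)).keys = r.keys := pvTokB_keys _ _ _ _ _ h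
    rw [ih _ _ (fun k hk' => hk ▸ h k hk'), hk]

-- A's result as a map over the deduplicated keywords
theorem pvA_char (doc_list keywords : List String) :
    multi_word_search doc_list keywords
      = (PySem.Set.ofList keywords).map
          (fun k => (k, pvMatchRep (keywords.count k) (PySem.Str.lower k) 0 doc_list)) := by
  by_cases hk : keywords = []
  · subst hk; rfl
  · unfold multi_word_search
    rw [if_neg hk]
    have hkeys1 : (keywords.foldl (fun d keyword => d.insert keyword ([] : List Int))
        (PySem.Dict.empty : PySem.Dict String (List Int))).keys = PySem.Set.ofList keywords := by
      rw [PySem.Dict.keys_foldl_insert keywords (fun _ _ => ([] : List Int))]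
      rfl
    have hkeys2 : ((PySem.List.enumerate doc_list).foldl (pvDocA keywords)
        (keywords.foldl (fun d keyword => d.insert keyword ([] : List Int)) PySem.Dict.empty)).keys
        = PySem.Set.ofList keywords := by
      rw [pvDocA_keys _ _ _ _ (fun k hk' => by
        rw [hkeys1]; exact (PySem.Set.mem_ofList keywords k).2 hk'), hkeys1]
    rw [PySem.Dict.items_eq_map_keys _ (hkeys2 ▸ PySem.Set.nodup_ofList keywords) ([] : List Int),
        hkeys2]
    apply List.map_congr_left
    intro k _
    rw [pvDocA_getD, pvInitA_getD _ _ _ (PySem.Dict.getD_empty _ _), List.nil_append]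

-- B's result: the same map over the deduplicated keywords
theorem pvB_char (doc_list keywords : List String) :
    multi_word_search_alt doc_list keywords
      = (PySem.Set.ofList keywords).map
          (fun k => (k, pvMatchRep (keywords.count k) (PySem.Str.lower k) 0 doc_list)) := by
  unfold multi_word_search_alt
  have hkeys1 : (keywords.foldl (fun r k => r.insert k ([] : List Int))
      (PySem.Dict.empty : PySem.Dict String (List Int))).keys = PySem.Set.ofList keywords := by
    rw [PySem.Dict.keys_foldl_insert keywords (fun _ _ => ([] : List Int))]
    rfl
  have hkeys2 : ((PySem.List.enumerate doc_list).foldl (pvDocB (pvByToken keywords))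
      (keywords.foldl (fun r k => r.insert k ([] : List Int)) PySem.Dict.empty)).keys
      = PySem.Set.ofList keywords := by
    rw [pvDocB_keys _ _ _ _ (fun k hk' => by
      rw [hkeys1]; exact (PySem.Set.mem_ofList keywords k).2 hk'), hkeys1]
  rw [PySem.Dict.items_eq_map_keys _ (hkeys2 ▸ PySem.Set.nodup_ofList keywords) ([] : List Int),
      hkeys2]
  apply List.map_congr_left
  intro k _
  rw [pvDocB_getD, pvInitA_getD _ _ _ (PySem.Dict.getD_empty _ _), List.nil_append]

-- ===== VERDICT (by name: the statement is the Claim_ definition above) =====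
theorem multi_word_search_spec : Claim_equal_multi_word_search := by
  intro doc_list keywords _
  show multi_word_search doc_list keywords = multi_word_search_alt doc_list keywords
  rw [pvA_char, pvB_char]
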